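-- pv_equiv track=rewrite | github.com/rudidev08/x4-foundations-version-diff | src/lib/file_level.py | _tail_by_budget
-- ===== SOURCE A (Python) =====
-- def _tail_by_budget(lines: list[str], budget_bytes: int) -> str:
--     out: list[str] = []
--     used = 0
--     for line in reversed(lines):
--         b = len(line.encode('utf-8'))
--         if used + b > budget_bytes and out:
--             break
--         out.insert(0, line)
--         used += b
--     return ''.join(out)
-- ===== SOURCE B (Python) =====
-- def _tail_by_budget(lines: list[str], budget_bytes: int) -> str:
--     n = len(lines)
--     if n == 0:
--         return ''
--     # prefix[i] = total encoded bytes of lines[:i]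
--     prefix = [0]
--     for line in lines:
--         prefix.append(prefix[-1] + len(line.encode('utf-8')))
--     total = prefix[n]
--     # binary-search the smallest start index whose suffix byte total fits the budget
--     lo, hi = 0, n
--     while lo < hi:
--         mid = (lo + hi) // 2
--         if total - prefix[mid] <= budget_bytes:
--             hi = mid
--         else:
--             lo = mid + 1
--     # the final line is always kept, even when it alone exceeds the budget
--     start = min(lo, n - 1)
--     return ''.join(lines[start:])
-- ===== Notes on version B (the rewrite author's own statement) =====
-- stated objective: alternative
-- what changed: Replaces A's reverse-accumulate scan with break by precomputed prefix byte sums plus a binary search for the smallest start index whose suffix byte total fits the budget (clamped so the last line is always kept), then joins lines[start:].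
import Mathlib
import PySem

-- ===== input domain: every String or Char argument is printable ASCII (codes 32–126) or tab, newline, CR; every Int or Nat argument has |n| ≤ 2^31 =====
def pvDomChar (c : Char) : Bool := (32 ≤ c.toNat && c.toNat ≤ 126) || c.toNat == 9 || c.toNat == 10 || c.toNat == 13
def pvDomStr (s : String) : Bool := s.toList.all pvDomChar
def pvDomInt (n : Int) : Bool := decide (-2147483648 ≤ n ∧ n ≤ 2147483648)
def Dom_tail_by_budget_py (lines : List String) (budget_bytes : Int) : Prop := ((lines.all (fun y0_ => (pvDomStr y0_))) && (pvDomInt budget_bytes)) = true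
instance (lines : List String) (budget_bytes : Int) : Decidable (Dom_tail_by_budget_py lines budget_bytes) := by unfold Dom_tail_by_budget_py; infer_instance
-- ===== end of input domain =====

-- B replaces A's reverse-accumulate scan by prefix byte sums plus a binary search for the
-- smallest starting index whose suffix total fits the budget (alternative decomposition).


-- ===== PORT A =====
-- len(line.encode('utf-8')): on the ASCII domain every character is one UTF-8 byte, so this
-- is the character count PySem.Str.len (exact on Dom_).
-- The 'for line in reversed(lines)' loop with its break; out and used are the loop state.
def tbbLoop (budget_bytes : Int) : List String → List String → Int → List String
  | [], out, _ => out
  | line :: rest, out, used =>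
    let b : Int := PySem.Str.len line
    if used + b > budget_bytes ∧ out ≠ [] then out
    else tbbLoop budget_bytes rest (line :: out) (used + b)

def tail_by_budget_py (lines : List String) (budget_bytes : Int) : String :=
  PySem.Str.join "" (tbbLoop budget_bytes lines.reverse [] 0)

-- ===== PORT B =====
-- prefix = [0]; for line in lines: prefix.append(prefix[-1] + len(line.encode('utf-8')))
def pvPrefix (lines : List String) : List Int :=
  lines.foldl (fun p line => p ++ [PySem.List.pyGetD p (-1) 0 + PySem.Str.len line]) [0]

-- while lo < hi: mid = (lo+hi)//2; if total - prefix[mid] <= budget: hi = mid else lo = mid+1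
def pvBsearch (pref : List Int) (total budget_bytes : Int) (lo hi : Nat) : Nat :=
  if lo < hi then
    let mid := (lo + hi) / 2
    if total - PySem.List.pyGetD pref (mid : Int) 0 ≤ budget_bytes then
      pvBsearch pref total budget_bytes lo mid
    else
      pvBsearch pref total budget_bytes (mid + 1) hi
  else lo
termination_by hi - lo
decreasing_by all_goals omega

def tail_by_budget_py_alt (lines : List String) (budget_bytes : Int) : String :=
  let n := lines.length
  if n = 0 then ""
  else
    let pref := pvPrefix lines
    let total := PySem.List.pyGetD pref (n : Int) 0
    let lo := pvBsearch pref total budget_bytes 0 n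
    let start := min lo (n - 1)
    PySem.Str.join "" (lines.drop start)

-- ===== PRECONDITION & SPEC =====
def Spec_tail_by_budget_py (lines : List String) (budget_bytes : Int) (out : String) : Prop := out = tail_by_budget_py_alt lines budget_bytes
instance (lines : List String) (budget_bytes : Int) (out : String) : Decidable (Spec_tail_by_budget_py lines budget_bytes out) := by unfold Spec_tail_by_budget_py; infer_instance

-- ===== CLAIM (what is proved, stated in full; the proofs are below) =====
def Claim_equal_tail_by_budget_py : Prop := ∀ (lines : List String) (budget_bytes : Int), Dom_tail_by_budget_py lines budget_bytes → Spec_tail_by_budget_py lines budget_bytes (tail_by_budget_py lines budget_bytes)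

-- ===== LEMMAS AND PROOFS =====

-- total byte size of a list of lines
def sumlen (l : List String) : Int := (l.map PySem.Str.len).sum
-- suffix byte total from index i
def sfx (l : List String) (i : Nat) : Int := sumlen (l.drop i)
-- the start index both programs compute: least i with sfx l i ≤ budget, clamped to length - 1
def startSpec (l : List String) (budget : Int) : Nat :=
  min ((List.range (l.length + 1)).findIdx (fun i => decide (sfx l i ≤ budget))) (l.length - 1)

theorem len_nonneg (s : String) : 0 ≤ PySem.Str.len s := by
  simp [PySem.Str.len_eq]

theorem sumlen_nonneg (l : List String) : 0 ≤ sumlen l := by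
  induction l with
  | nil => simp [sumlen]
  | cons x xs ih =>
    have := len_nonneg x
    simp only [sumlen, List.map_cons, List.sum_cons] at *
    omega

theorem sumlen_append (a b : List String) : sumlen (a ++ b) = sumlen a + sumlen b := by
  simp [sumlen]

theorem sumlen_cons (x : String) (l : List String) :
    sumlen (x :: l) = PySem.Str.len x + sumlen l := by
  simp [sumlen]

theorem sumlen_drop_le (m : List String) (k : Nat) : sumlen (m.drop k) ≤ sumlen m := by
  conv_rhs => rw [← List.take_append_drop k m]
  rw [sumlen_append]
  have := sumlen_nonneg (m.take k)
  omega

theorem sfx_antitone (l : List String) {i j : Nat} (h : i ≤ j) : sfx l j ≤ sfx l i := by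
  unfold sfx
  rw [show l.drop j = (l.drop i).drop (j - i) by rw [List.drop_drop]; congr 1; omega]
  exact sumlen_drop_le _ _

theorem sfx_append_left (a b : List String) : sfx (a ++ b) a.length = sumlen b := by
  simp [sfx]

theorem sfx_zero (l : List String) : sfx l 0 = sumlen l := rfl

theorem sfx_take_drop (l : List String) (i : Nat) :
    sumlen (l.take i) + sfx l i = sumlen l := by
  unfold sfx
  rw [← sumlen_append, List.take_append_drop]

-- startSpec properties
theorem startSpec_le (l : List String) (budget : Int) : startSpec l budget ≤ l.length - 1 :=
  min_le_right _ _

theorem startSpec_not (l : List String) (budget : Int) :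
    ∀ i, i < startSpec l budget → ¬ sfx l i ≤ budget := by
  intro i hi hp
  unfold startSpec at hi
  have hif : i < (List.range (l.length + 1)).findIdx (fun i => decide (sfx l i ≤ budget)) :=
    lt_of_lt_of_le hi (min_le_left _ _)
  have hni := List.not_of_lt_findIdx hif
  simp only [List.getElem_range, decide_eq_false_iff_not] at hni
  exact hni hp

theorem startSpec_pred_or (l : List String) (budget : Int) :
    sfx l (startSpec l budget) ≤ budget ∨ startSpec l budget = l.length - 1 := by
  unfold startSpec
  by_cases hf : (List.range (l.length + 1)).findIdx (fun i => decide (sfx l i ≤ budget)) ≤ l.length - 1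
  · left
    rw [min_eq_left hf]
    have hlt : (List.range (l.length + 1)).findIdx (fun i => decide (sfx l i ≤ budget)) <
        (List.range (l.length + 1)).length := by
      simp only [List.length_range]; omega
    have := List.findIdx_getElem (w := hlt)
    simpa only [List.getElem_range, decide_eq_true_eq] using this
  · right
    exact min_eq_right (by omega)

theorem start_unique (l : List String) (budget : Int) (s : Nat)
    (h1 : s ≤ l.length - 1)
    (h2 : ∀ i, i < s → ¬ sfx l i ≤ budget)
    (h3 : sfx l s ≤ budget ∨ s = l.length - 1) :
    s = startSpec l budget := by
  have p1 := startSpec_le l budget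
  have p2 := startSpec_not l budget
  have p3 := startSpec_pred_or l budget
  rcases lt_trichotomy s (startSpec l budget) with h | h | h
  · exfalso
    rcases h3 with hp | he
    · exact p2 s h hp
    · omega
  · exact h
  · exfalso
    rcases p3 with hp | he
    · exact h2 _ h hp
    · omega

-- ===== A-side characterisation =====
-- the stepwise kept prefix of the reversed list
def takeB (budget : Int) : List String → Int → List String
  | [], _ => []
  | x :: xs, used =>
    if used + PySem.Str.len x > budget then []
    else x :: takeB budget xs (used + PySem.Str.len x)

theorem tbbLoop_acc (budget : Int) (r : List String) :
    ∀ out used, out ≠ [] →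
      tbbLoop budget r out used = (takeB budget r used).reverse ++ out := by
  induction r with
  | nil => intro out used _; simp [tbbLoop, takeB]
  | cons y r' ih =>
    intro out used hne
    simp only [tbbLoop, takeB]
    by_cases h : used + PySem.Str.len y > budget
    · rw [if_pos ⟨h, hne⟩, if_pos h]
      simp
    · rw [if_neg (by tauto), if_neg h, ih _ _ (by simp)]
      simp

-- the invariant induction: acc is the kept tail, within budget unless it is a single line
theorem takeB_drop (budget : Int) (r : List String) :
    ∀ acc, acc ≠ [] → (sumlen acc ≤ budget ∨ acc.length = 1) →
      (takeB budget r (sumlen acc)).reverse ++ acc =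
        (r.reverse ++ acc).drop (startSpec (r.reverse ++ acc) budget) := by
  induction r with
  | nil =>
    intro acc hne hinv
    have hlacc : 1 ≤ acc.length := List.length_pos_iff.mpr hne
    simp only [takeB, List.reverse_nil, List.nil_append]
    have hs : (0 : Nat) = startSpec acc budget := by
      apply start_unique
      · omega
      · intro i hi; omega
      · rcases hinv with hb | h1
        · left; rw [sfx_zero]; exact hb
        · right; omega
    rw [← hs, List.drop_zero]
  | cons y r' ih =>
    intro acc hne hinv
    have hlacc : 1 ≤ acc.length := List.length_pos_iff.mpr hne
    have hly := len_nonneg y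
    simp only [takeB]
    by_cases h : sumlen acc + PySem.Str.len y > budget
    · rw [if_pos h]
      simp only [List.reverse_nil, List.nil_append]
      have hl2 : (y :: r').reverse ++ acc = r'.reverse ++ (y :: acc) := by simp
      have hl3 : (y :: r').reverse ++ acc = (r'.reverse ++ [y]) ++ acc := by simp
      have hlen : ((y :: r').reverse ++ acc).length = r'.length + 1 + acc.length := by
        simp; omega
      have hs : r'.length + 1 = startSpec ((y :: r').reverse ++ acc) budget := by
        apply start_unique
        · omega
        · intro i hi hp
          have h1 : sfx ((y :: r').reverse ++ acc) r'.length ≤ sfx ((y :: r').reverse ++ acc) i :=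
            sfx_antitone _ (by omega)
          have h2 : sfx ((y :: r').reverse ++ acc) r'.length = sumlen (y :: acc) := by
            rw [hl2]
            have := sfx_append_left r'.reverse (y :: acc)
            simpa using this
          rw [sumlen_cons] at h2
          omega
        · rcases hinv with hb | h1
          · left
            have h2 : sfx ((y :: r').reverse ++ acc) (r'.length + 1) = sumlen acc := by
              rw [hl3]
              have := sfx_append_left (r'.reverse ++ [y]) acc
              simpa using this
            omega
          · right
            omega
      rw [← hs, hl3]
      rw [show r'.length + 1 = (r'.reverse ++ [y]).length by simp]
      exact List.drop_left.symm
    · rw [if_neg h]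
      have hsum : sumlen acc + PySem.Str.len y = sumlen (y :: acc) := by
        rw [sumlen_cons]; ring
      rw [hsum]
      have hIH := ih (y :: acc) (by simp) (Or.inl (by omega))
      have hl2 : (y :: r').reverse ++ acc = r'.reverse ++ (y :: acc) := by simp
      rw [hl2]
      rw [← hIH]
      simp

theorem A_char (lines : List String) (budget : Int) (h : lines ≠ []) :
    tbbLoop budget lines.reverse [] 0 = lines.drop (startSpec lines budget) := by
  obtain ⟨x₀, r, hr⟩ : ∃ x rr, lines.reverse = x :: rr := by
    cases hrev : lines.reverse with
    | nil => exact absurd (by simpa using congrArg List.reverse hrev) h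
    | cons a l => exact ⟨a, l, rfl⟩
  have hl : lines = r.reverse ++ [x₀] := by
    have := congrArg List.reverse hr
    simpa using this
  rw [hr]
  simp only [tbbLoop]
  rw [if_neg (by simp)]
  rw [tbbLoop_acc budget r [x₀] (0 + PySem.Str.len x₀) (by simp)]
  rw [show (0 : Int) + PySem.Str.len x₀ = sumlen [x₀] by simp [sumlen]]
  rw [takeB_drop budget r [x₀] (by simp) (Or.inr rfl)]
  rw [← hl]

-- ===== B-side characterisation =====
def pfxFrom (c : Int) : List String → List Int
  | [] => []
  | l :: ls => (c + PySem.Str.len l) :: pfxFrom (c + PySem.Str.len l) ls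

theorem foldl_prefix (ls : List String) :
    ∀ (acc : List Int) (x : Int),
      ls.foldl (fun p line => p ++ [PySem.List.pyGetD p (-1) 0 + PySem.Str.len line]) (acc ++ [x])
        = (acc ++ [x]) ++ pfxFrom x ls := by
  induction ls with
  | nil => intro acc x; simp [pfxFrom]
  | cons l ls ih =>
    intro acc x
    simp only [List.foldl_cons, PySem.List.pyGetD_neg_one_append_singleton]
    rw [show (acc ++ [x]) ++ [x + PySem.Str.len l] = (acc ++ [x]) ++ [x + PySem.Str.len l] from rfl]
    rw [ih (acc ++ [x]) (x + PySem.Str.len l)]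
    simp [pfxFrom]

theorem pvPrefix_eq (lines : List String) :
    pvPrefix lines = [0] ++ pfxFrom 0 lines := by
  have := foldl_prefix lines [] 0
  simpa [pvPrefix] using this

theorem pfxFrom_getD (ls : List String) :
    ∀ (c : Int) (j : Nat), j < ls.length →
      (pfxFrom c ls).getD j 0 = c + sumlen (ls.take (j + 1)) := by
  induction ls with
  | nil => intro c j hj; simp at hj
  | cons l ls ih =>
    intro c j hj
    cases j with
    | zero => simp [pfxFrom, sumlen]
    | succ j =>
      simp only [pfxFrom, List.getD_cons_succ]
      rw [ih _ j (by simpa using hj)]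
      rw [List.take_succ_cons, sumlen_cons]
      ring

theorem pvPrefix_getD (lines : List String) (i : Nat) (hi : i ≤ lines.length) :
    PySem.List.pyGetD (pvPrefix lines) (i : Int) 0 = sumlen (lines.take i) := by
  rw [PySem.List.pyGetD_natCast, pvPrefix_eq]
  cases i with
  | zero => simp [sumlen]
  | succ j =>
    simp only [List.singleton_append, List.getD_cons_succ]
    rw [pfxFrom_getD lines 0 j (by omega)]
    ring

-- binary-search invariant
theorem pvBsearch_spec (pref : List Int) (total budget : Int) (n : Nat)
    (mono : ∀ i j : Nat, i ≤ j → j < n →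
      total - PySem.List.pyGetD pref (i : Int) 0 ≤ budget →
      total - PySem.List.pyGetD pref (j : Int) 0 ≤ budget) :
    ∀ (k lo hi : Nat), hi - lo = k → lo ≤ hi → hi ≤ n →
      (∀ i, i < lo → ¬ total - PySem.List.pyGetD pref (i : Int) 0 ≤ budget) →
      (hi < n → total - PySem.List.pyGetD pref (hi : Int) 0 ≤ budget) →
      lo ≤ pvBsearch pref total budget lo hi ∧
      pvBsearch pref total budget lo hi ≤ hi ∧
      (∀ i, i < pvBsearch pref total budget lo hi →
        ¬ total - PySem.List.pyGetD pref (i : Int) 0 ≤ budget) ∧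
      (pvBsearch pref total budget lo hi < n →
        total - PySem.List.pyGetD pref (pvBsearch pref total budget lo hi : Int) 0 ≤ budget) := by
  intro k
  induction k using Nat.strong_induction_on with
  | _ k ihk =>
    intro lo hi hk hlh hhn hlo hhi
    rw [pvBsearch]
    by_cases h : lo < hi
    · simp only [if_pos h]
      by_cases hp : total - PySem.List.pyGetD pref (((lo + hi) / 2 : Nat) : Int) 0 ≤ budget
      · rw [if_pos hp]
        have hrec := ihk ((lo + hi) / 2 - lo) (by omega) lo ((lo + hi) / 2) rfl (by omega)
          (by omega) hlo (fun _ => hp)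
        exact ⟨hrec.1, by omega, hrec.2.2.1, hrec.2.2.2⟩
      · rw [if_neg hp]
        have hlo' : ∀ i, i < (lo + hi) / 2 + 1 →
            ¬ total - PySem.List.pyGetD pref (i : Int) 0 ≤ budget := by
          intro i hi' hpi
          by_cases hc : i < lo
          · exact hlo i hc hpi
          · exact hp (mono i ((lo + hi) / 2) (by omega) (by omega) hpi)
        have hrec := ihk (hi - ((lo + hi) / 2 + 1)) (by omega) ((lo + hi) / 2 + 1) hi rfl
          (by omega) hhn hlo' hhi
        exact ⟨by omega, hrec.2.1, hrec.2.2.1, hrec.2.2.2⟩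
    · simp only [if_neg h]
      have he : lo = hi := by omega
      refine ⟨le_refl _, by omega, hlo, ?_⟩
      rw [he]
      exact hhi

theorem B_start (lines : List String) (budget : Int) (h : lines ≠ []) :
    min (pvBsearch (pvPrefix lines)
          (PySem.List.pyGetD (pvPrefix lines) (lines.length : Int) 0) budget 0 lines.length)
        (lines.length - 1) = startSpec lines budget := by
  have hlacc : 1 ≤ lines.length := List.length_pos_iff.mpr h
  have htot : PySem.List.pyGetD (pvPrefix lines) (lines.length : Int) 0 = sumlen lines := by
    rw [pvPrefix_getD lines lines.length (le_refl _), List.take_length]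
  have hpred : ∀ i : Nat, i ≤ lines.length →
      (PySem.List.pyGetD (pvPrefix lines) (lines.length : Int) 0 -
        PySem.List.pyGetD (pvPrefix lines) (i : Int) 0 ≤ budget ↔ sfx lines i ≤ budget) := by
    intro i hi
    rw [htot, pvPrefix_getD lines i hi]
    have := sfx_take_drop lines i
    omega
  have hmono : ∀ i j : Nat, i ≤ j → j < lines.length →
      PySem.List.pyGetD (pvPrefix lines) (lines.length : Int) 0 -
        PySem.List.pyGetD (pvPrefix lines) (i : Int) 0 ≤ budget →
      PySem.List.pyGetD (pvPrefix lines) (lines.length : Int) 0 -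
        PySem.List.pyGetD (pvPrefix lines) (j : Int) 0 ≤ budget := by
    intro i j hij hj hp
    rw [hpred j (by omega)]
    rw [hpred i (by omega)] at hp
    have := sfx_antitone lines hij
    omega
  have hspec := pvBsearch_spec (pvPrefix lines)
    (PySem.List.pyGetD (pvPrefix lines) (lines.length : Int) 0) budget lines.length hmono
    lines.length 0 lines.length rfl (by omega) (le_refl _) (by omega) (by omega)
  set r := pvBsearch (pvPrefix lines)
    (PySem.List.pyGetD (pvPrefix lines) (lines.length : Int) 0) budget 0 lines.length with hr
  apply start_unique
  · omega
  · intro i hi hp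
    have hir : i < r := by omega
    exact hspec.2.2.1 i hir ((hpred i (by omega)).mpr hp)
  · by_cases hc : r ≤ lines.length - 1
    · left
      rw [min_eq_left hc]
      have hrn : r < lines.length := by omega
      exact (hpred r (by omega)).mp (hspec.2.2.2 hrn)
    · right
      exact min_eq_right (by omega)

-- ===== VERDICT (by name: the statement is the Claim_ definition above) =====
theorem tail_by_budget_py_spec : Claim_equal_tail_by_budget_py := by
  intro lines budget _
  unfold Spec_tail_by_budget_py
  by_cases h : lines = []
  · subst h; rfl
  · have hn : ¬ lines.length = 0 := by simpa [List.length_eq_zero_iff] using h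
    simp only [tail_by_budget_py, tail_by_budget_py_alt, if_neg hn]
    congr 1
    rw [A_char lines budget h, B_start lines budget h]
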